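-- pv_equiv track=rewrite | github.com/InYvn/RSCC | code_splitter/python_code_splitter.py | merge_comment_blocks
-- ===== SOURCE A (Python) =====
-- def is_function_or_class_block(block):
--     stripped_block = block.strip()
--     return stripped_block.startswith('def ') or stripped_block.startswith('class ')
--
-- def is_comment_block(block):
--     stripped_block = block.strip()
--     if not stripped_block:
--         return False
--     # Check if it's a triple-quoted comment
--     if stripped_block.startswith('"""') and '"""' in stripped_block:
--         return True
--     # Or if it's a single-line comment
--     return stripped_block.startswith('#')
--
-- def merge_comment_blocks(code_blocks):
--     merged_blocks = []
--     i = 0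
--     while i < len(code_blocks):
--         block = code_blocks[i]
--         if i + 1 < len(code_blocks):
--             next_block = code_blocks[i + 1]
--             # If the current block is a comment block and the next block is a function or class block, merge them
--             if is_comment_block(block) and is_function_or_class_block(next_block):
--                 merged_block = block + next_block
--                 merged_blocks.append(merged_block)
--                 i += 2
--                 continue
--         merged_blocks.append(block)
--         i += 1
--     return merged_blocks
-- ===== SOURCE B (Python) =====
-- def is_function_or_class_block(block):
--     stripped_block = block.strip()
--     return stripped_block.startswith('def ') or stripped_block.startswith('class ')
--
-- def is_comment_block(block):
--     stripped_block = block.strip()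
--     if not stripped_block:
--         return False
--     if stripped_block.startswith('"""') and '"""' in stripped_block:
--         return True
--     return stripped_block.startswith('#')
--
-- def merge_comment_blocks(code_blocks):
--     result = []
--     prev_mergeable_comment = False
--     for block in code_blocks:
--         if prev_mergeable_comment and is_function_or_class_block(block):
--             result[-1] = result[-1] + block
--             prev_mergeable_comment = False
--         else:
--             result.append(block)
--             prev_mergeable_comment = is_comment_block(block)
--     return result
-- ===== Notes on version B (the rewrite author's own statement) =====
-- stated objective: simpler
-- what changed: Replaces A's while-loop with index arithmetic and a look-ahead at code_blocks[i+1] (skipping by 2 after a merge) by a plain single forward for-loop that threads a prev-mergeable-comment flag and merges into the last emitted block, clearing the flag after a merge.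
import Mathlib
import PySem

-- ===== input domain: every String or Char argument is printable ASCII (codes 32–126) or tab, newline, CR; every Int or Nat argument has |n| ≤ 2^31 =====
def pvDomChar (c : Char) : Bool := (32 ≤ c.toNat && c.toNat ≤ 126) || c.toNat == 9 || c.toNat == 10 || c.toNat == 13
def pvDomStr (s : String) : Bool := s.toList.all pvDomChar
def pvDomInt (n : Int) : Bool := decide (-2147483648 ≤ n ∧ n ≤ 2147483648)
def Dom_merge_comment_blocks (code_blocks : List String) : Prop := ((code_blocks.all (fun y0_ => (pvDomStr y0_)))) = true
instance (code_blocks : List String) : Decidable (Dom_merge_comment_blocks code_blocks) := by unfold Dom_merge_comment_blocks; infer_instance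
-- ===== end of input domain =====

-- B replaces A's look-ahead index loop (peek at code_blocks[i+1], skip by 2) with a single
-- forward pass threading a "previous block was a mergeable comment" flag through the
-- accumulator (merging into the last emitted block); objective: simpler decomposition, same cost.

-- shared helpers (both Python files define them identically)
def pyIsFnOrClass (block : String) : Bool :=
  let stripped := PySem.Str.strip block
  PySem.Str.startswith stripped "def " || PySem.Str.startswith stripped "class "

def pyIsComment (block : String) : Bool :=
  let stripped := PySem.Str.strip block
  if stripped == "" then false
  else if PySem.Str.startswith stripped "\"\"\"" && PySem.Str.isIn "\"\"\"" stripped then true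
  else PySem.Str.startswith stripped "#"

-- ===== PORT A =====
-- A's while loop over index i, reading code_blocks[i] and (when i+1 < len) code_blocks[i+1];
-- transliterated as recursion on the suffix starting at i.
def mergeA_go : List String → List String
  | [] => []
  | [b] => [b]
  | b :: next :: rest =>
    if pyIsComment b && pyIsFnOrClass next then (b ++ next) :: mergeA_go rest
    else b :: mergeA_go (next :: rest)

def merge_comment_blocks (code_blocks : List String) : List String :=
  mergeA_go code_blocks

-- ===== PORT B =====
-- Source B's for-loop: state = (result, prev_mergeable_comment); result kept reversed so that
-- "result[-1] = result[-1] + block" is an update of the head.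
def mergeB_loop : List String → List String → Bool → List String
  | [], result, _ => result.reverse
  | block :: rest, result, prev =>
    if prev && pyIsFnOrClass block then
      match result with
      | h :: t => mergeB_loop rest ((h ++ block) :: t) false
      | [] => mergeB_loop rest [block] false  -- unreachable: prev = true only after an append
    else mergeB_loop rest (block :: result) (pyIsComment block)

def merge_comment_blocks_alt (code_blocks : List String) : List String :=
  mergeB_loop code_blocks [] false

-- ===== PRECONDITION & SPEC =====
def Spec_merge_comment_blocks (code_blocks : List String) (out : List String) : Prop := out = merge_comment_blocks_alt code_blocks
instance (code_blocks : List String) (out : List String) : Decidable (Spec_merge_comment_blocks code_blocks out) := by unfold Spec_merge_comment_blocks; infer_instance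

-- ===== CLAIM (what is proved, stated in full; the proofs are below) =====
def Claim_equal_merge_comment_blocks : Prop := ∀ (code_blocks : List String), Dom_merge_comment_blocks code_blocks → Spec_merge_comment_blocks code_blocks (merge_comment_blocks code_blocks)

-- ===== LEMMAS AND PROOFS =====

-- Invariant of B's pass, mutually with the flagged case: with the flag cleared the loop emits
-- exactly A's output for the remaining suffix; with the flag set to pyIsComment h and h already
-- emitted, it emits A's output for h :: suffix.
theorem mergeB_loop_spec (l : List String) :
    (∀ rev, mergeB_loop l rev false = rev.reverse ++ mergeA_go l) ∧
    (∀ h t, mergeB_loop l (h :: t) (pyIsComment h) = t.reverse ++ mergeA_go (h :: l)) := by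
  induction l with
  | nil =>
    constructor
    · intro rev; simp [mergeB_loop, mergeA_go]
    · intro h t; simp [mergeB_loop, mergeA_go]
  | cons b rest ih =>
    constructor
    · intro rev
      simpa [mergeB_loop] using ih.2 b rev
    · intro h t
      cases hch : pyIsComment h with
      | true =>
        cases hf : pyIsFnOrClass b with
        | true => simp [mergeB_loop, mergeA_go, hch, hf, ih.1]
        | false =>
          have hb := ih.2 b (h :: t)
          simp [mergeB_loop, mergeA_go, hch, hf, hb]
      | false =>
        have hb := ih.2 b (h :: t)
        simp [mergeB_loop, mergeA_go, hch, hb]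

theorem merge_eq (code_blocks : List String) :
    merge_comment_blocks code_blocks = merge_comment_blocks_alt code_blocks := by
  unfold merge_comment_blocks merge_comment_blocks_alt
  simpa using ((mergeB_loop_spec code_blocks).1 []).symm

-- ===== VERDICT (by name: the statement is the Claim_ definition above) =====
theorem merge_comment_blocks_spec : Claim_equal_merge_comment_blocks := by
  intro code_blocks _
  exact merge_eq code_blocks
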